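-- pv_equiv track=rewrite | github.com/lissity/AoC | 2018/Day12/main.py | calc_pot_sum
-- ===== SOURCE A (Python) =====
-- def calc_pot_sum(state, zero_index):
--     sum = 0
--     point_value = 0
--     if(zero_index >= 0):
--         for i in range(zero_index, len(state)):
--             if state[i] == '#':
--                 sum += point_value
--             point_value += 1
--         point_value = 0
--         for i in range(zero_index, -1, -1):
--             if state[i] == '#':
--                 sum += point_value
--             point_value -= 1
--     elif(zero_index < 0):
--         point_value = abs(zero_index)
--         for i in range(0, len(state)):
--             if(state[i] == '#'):
--                 sum += point_value
--             point_value +=1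
--     return sum
-- ===== SOURCE B (Python) =====
-- def calc_pot_sum(state, zero_index):
--     s = sum(i for i, c in enumerate(state) if c == '#')
--     return s - zero_index * state.count('#')
-- ===== Notes on version B (the rewrite author's own statement) =====
-- stated objective: simpler
-- what changed: Replaces A's sign-branched forward/backward index scans with manual point_value counters by one enumerate pass collecting the index sum S and a count C, returning the closed form S - zero_index*C.
import Mathlib
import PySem

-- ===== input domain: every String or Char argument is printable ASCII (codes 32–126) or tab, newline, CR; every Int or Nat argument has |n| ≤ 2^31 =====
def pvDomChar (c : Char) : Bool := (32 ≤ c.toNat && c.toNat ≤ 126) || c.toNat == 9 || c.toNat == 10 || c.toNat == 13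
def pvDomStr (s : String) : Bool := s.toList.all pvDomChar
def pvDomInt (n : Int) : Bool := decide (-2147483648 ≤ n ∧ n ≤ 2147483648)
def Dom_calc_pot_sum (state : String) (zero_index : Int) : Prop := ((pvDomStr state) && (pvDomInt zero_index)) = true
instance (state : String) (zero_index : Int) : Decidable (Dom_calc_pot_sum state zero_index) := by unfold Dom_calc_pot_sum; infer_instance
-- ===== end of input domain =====

-- B replaces A's sign-branched forward/backward scans by one enumerate pass and the closed form S - zero_index*C (objective: simpler).

-- ===== PORT A =====
-- Literal transliteration of A: the two loops of the zero_index ≥ 0 branch and the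
-- single loop of the zero_index < 0 branch, each carrying the (sum, point_value) pair.
def calc_pot_sum (state : String) (zero_index : Int) : Int :=
  let cs := state.toList
  if zero_index ≥ 0 then
    let r1 := (PySem.List.pyRange zero_index (cs.length : Int) 1).foldl
      (fun (p : Int × Int) i =>
        ((if PySem.List.pyGetD cs i ' ' = '#' then p.1 + p.2 else p.1), p.2 + 1)) (0, 0)
    let r2 := (PySem.List.pyRange zero_index (-1) (-1)).foldl
      (fun (p : Int × Int) i =>
        ((if PySem.List.pyGetD cs i ' ' = '#' then p.1 + p.2 else p.1), p.2 - 1)) (r1.1, 0)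
    r2.1
  else
    let r := (PySem.List.pyRange 0 (cs.length : Int) 1).foldl
      (fun (p : Int × Int) i =>
        ((if PySem.List.pyGetD cs i ' ' = '#' then p.1 + p.2 else p.1), p.2 + 1)) (0, |zero_index|)
    r.1

-- ===== PORT B =====
-- Literal transliteration of B: S = sum of indices of '#' via enumerate, C = count of '#'.
def calc_pot_sum_alt (state : String) (zero_index : Int) : Int :=
  let cs := state.toList
  let s := (PySem.List.enumerate cs 0).foldl
    (fun (acc : Int) (p : Int × Char) => if p.2 = '#' then acc + p.1 else acc) 0
  s - zero_index * (PySem.List.count cs '#' : Int)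

-- ===== PRECONDITION & SPEC =====
-- A raises IndexError (state[zero_index] in the backward loop) when 0 ≤ zero_index
-- and zero_index ≥ len(state); exactly those inputs are excluded.
def Pre_calc_pot_sum (state : String) (zero_index : Int) : Prop :=
  zero_index < 0 ∨ zero_index < (state.toList.length : Int)
instance (state : String) (zero_index : Int) : Decidable (Pre_calc_pot_sum state zero_index) := by unfold Pre_calc_pot_sum; infer_instance
def pvWitness_calc_pot_sum : String × Int := ("#.#", 1)

def Spec_calc_pot_sum (state : String) (zero_index : Int) (out : Int) : Prop := out = calc_pot_sum_alt state zero_index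
instance (state : String) (zero_index : Int) (out : Int) : Decidable (Spec_calc_pot_sum state zero_index out) := by unfold Spec_calc_pot_sum; infer_instance

-- ===== CLAIM (what is proved, stated in full; the proofs are below) =====
def Claim_equal_calc_pot_sum : Prop := ∀ (state : String) (zero_index : Int), Dom_calc_pot_sum state zero_index → Pre_calc_pot_sum state zero_index → Spec_calc_pot_sum state zero_index (calc_pot_sum state zero_index)

-- ===== LEMMAS AND PROOFS =====

-- The common value both programs compute: Σ over the '#' positions of l of (pv + position).
def tallyC : List Char → Int → Int
  | [], _ => 0
  | c :: t, pv => (if c = '#' then pv else 0) + tallyC t (pv + 1)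

theorem tallyC_append (l1 l2 : List Char) (pv : Int) :
    tallyC (l1 ++ l2) pv = tallyC l1 pv + tallyC l2 (pv + l1.length) := by
  induction l1 generalizing pv with
  | nil => simp [tallyC]
  | cons c t ih => simp [tallyC, ih]; push_cast; ring_nf

theorem tallyC_linear (l : List Char) (pv : Int) :
    tallyC l pv = pv * (l.count '#' : Int) + tallyC l 0 := by
  induction l generalizing pv with
  | nil => simp [tallyC]
  | cons c t ih =>
    simp only [tallyC, List.count_cons]
    rw [ih (pv + 1), ih (0 + 1)]
    by_cases h : c = '#' <;> simp [h] <;> ring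

-- A's forward loop (on any suffix), as a fold over the chars themselves.
theorem foldUp_eq_tallyC (l : List Char) (s pv : Int) :
    (l.foldl (fun (p : Int × Int) c =>
      ((if c = '#' then p.1 + p.2 else p.1), p.2 + 1)) (s, pv)).1 = s + tallyC l pv := by
  induction l generalizing s pv with
  | nil => simp [tallyC]
  | cons c t ih =>
    simp only [List.foldl_cons, tallyC]
    rw [ih]
    by_cases h : c = '#' <;> simp [h] <;> ring

-- A's backward loop: range(a, -1, -1) over the prefix take (a+1).
theorem foldDown_eq_tallyC (cs : List Char) (a : Nat) (ha : a < cs.length) :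
    ∀ (s pv : Int), ((PySem.List.pyRange (a : Int) (-1) (-1)).foldl
      (fun (p : Int × Int) i =>
        ((if PySem.List.pyGetD cs i ' ' = '#' then p.1 + p.2 else p.1), p.2 - 1)) (s, pv)).1
      = s + tallyC (cs.take (a + 1)) (pv - a) := by
  induction a with
  | zero =>
    intro s pv
    rw [PySem.List.pyRange_neg_one_cons (by norm_num), PySem.List.pyRange_neg_one_eq_nil (by norm_num)]
    obtain ⟨c, t, rfl⟩ : ∃ c t, cs = c :: t := by
      cases cs with
      | nil => simp at ha
      | cons c t => exact ⟨c, t, rfl⟩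
    by_cases h : c = '#' <;> simp [PySem.List.pyGetD, tallyC, h]
  | succ a ih =>
    intro s pv
    have h1 : ((a + 1 : Nat) : Int) - 1 = (a : Int) := by push_cast; ring
    rw [PySem.List.pyRange_neg_one_cons (by push_cast; omega), h1]
    simp only [List.foldl_cons]
    rw [ih (Nat.lt_of_succ_lt ha)]
    have hget : PySem.List.pyGetD cs ((a + 1 : Nat) : Int) ' ' = cs[a + 1] := by
      rw [PySem.List.pyGetD_natCast]
      exact List.getD_eq_getElem cs ' ' ha
    have htake : cs.take (a + 1 + 1) = cs.take (a + 1) ++ [cs[a + 1]] := by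
      rw [List.take_add_one]
      simp [List.getElem?_eq_getElem ha]
    rw [htake, tallyC_append, hget]
    have hlen : ((cs.take (a + 1)).length : Int) = (a : Int) + 1 := by
      simp [List.length_take]; omega
    rw [hlen]
    by_cases h : cs[a + 1] = '#' <;> simp [tallyC, h] <;> ring_nf

-- B equals tallyC cs 0 minus z times the count.
theorem enumFold_eq_tallyC (l : List Char) : ∀ (s0 k : Int),
    (PySem.List.enumerate l k).foldl
      (fun (acc : Int) (p : Int × Char) => if p.2 = '#' then acc + p.1 else acc) s0
    = s0 + tallyC l k := by
  induction l with
  | nil => intro s0 k; simp [PySem.List.enumerate_nil, tallyC]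
  | cons c t ih =>
    intro s0 k
    rw [PySem.List.enumerate_cons]
    simp only [List.foldl_cons, tallyC]
    rw [ih]
    by_cases h : c = '#' <;> simp [h] <;> ring

theorem alt_eq_tallyC (state : String) (z : Int) :
    calc_pot_sum_alt state z = tallyC state.toList (-z) := by
  unfold calc_pot_sum_alt
  simp only [enumFold_eq_tallyC, PySem.List.count_eq]
  rw [tallyC_linear state.toList (-z)]
  ring

-- ===== VERDICT (by name: the statement is the Claim_ definition above) =====
theorem calc_pot_sum_spec : Claim_equal_calc_pot_sum := by
  unfold Claim_equal_calc_pot_sum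
  intro state z _ hpre
  unfold Spec_calc_pot_sum
  rw [alt_eq_tallyC]
  unfold calc_pot_sum
  set cs := state.toList with hcs
  by_cases hz : z ≥ 0
  · simp only [if_pos hz]
    have hzlt : z < (cs.length : Int) := by
      rcases hpre with h | h
      · omega
      · exact h
    have hz' : z = ((z.toNat : Nat) : Int) := by omega
    set m := z.toNat with hm
    have hmlt : m < cs.length := by omega
    -- forward loop
    rw [show (PySem.List.pyRange z (cs.length : Int) 1).foldl
          (fun (p : Int × Int) i =>
            ((if PySem.List.pyGetD cs i ' ' = '#' then p.1 + p.2 else p.1), p.2 + 1)) (0, 0)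
        = (cs.drop z.toNat).foldl
          (fun (p : Int × Int) c =>
            ((if c = '#' then p.1 + p.2 else p.1), p.2 + 1)) (0, 0) from
      PySem.List.foldl_pyRange_pyGetD' cs ' '
        (fun (p : Int × Int) c => ((if c = '#' then p.1 + p.2 else p.1), p.2 + 1)) (0, 0) hz]
    rw [hz']
    rw [foldDown_eq_tallyC cs m hmlt]
    rw [foldUp_eq_tallyC]
    simp only [Int.toNat_natCast]
    have hsplit : tallyC cs (-(m : Int)) =
        tallyC (cs.take (m + 1)) (-(m : Int)) + tallyC (cs.drop (m + 1)) (-(m : Int) + ((cs.take (m + 1)).length : Int)) := by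
      conv_lhs => rw [← List.take_append_drop (m + 1) cs]
      exact tallyC_append _ _ _
    have hlen : ((cs.take (m + 1)).length : Int) = (m : Int) + 1 := by
      simp [List.length_take]; omega
    have hdropm : cs.drop m = cs[m] :: cs.drop (m + 1) := List.drop_eq_getElem_cons hmlt
    rw [hsplit, hlen, hdropm]
    have hhead : tallyC (cs[m] :: cs.drop (m + 1)) 0 = tallyC (cs.drop (m + 1)) 1 := by
      by_cases h : cs[m] = '#' <;> simp [tallyC, h]
    rw [hhead]
    have hzm : -(m : Int) + ((m : Int) + 1) = 1 := by ring
    have h0m : (0 : Int) - (m : Int) = -(m : Int) := by ring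
    rw [hzm, h0m]
    ring
  · simp only [if_neg hz]
    rw [show (PySem.List.pyRange 0 (cs.length : Int) 1).foldl
          (fun (p : Int × Int) i =>
            ((if PySem.List.pyGetD cs i ' ' = '#' then p.1 + p.2 else p.1), p.2 + 1)) (0, |z|)
        = cs.foldl
          (fun (p : Int × Int) c =>
            ((if c = '#' then p.1 + p.2 else p.1), p.2 + 1)) (0, |z|) from
      PySem.List.foldl_pyRange_zero_pyGetD' cs ' '
        (fun (p : Int × Int) c => ((if c = '#' then p.1 + p.2 else p.1), p.2 + 1)) (0, |z|)]
    rw [foldUp_eq_tallyC]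
    have : |z| = -z := abs_of_neg (by omega)
    rw [this]
    ring
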